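-- pv_equiv track=rewrite | github.com/manwar/perlweeklychallenge-club | challenge-292/lubos-kolouch/python/ch-1.py | twice_largest_index
-- ===== SOURCE A (Python) =====
-- def twice_largest_index(ints):
--     if not ints:
--         return -1
--
--     max_value = max(ints)
--     max_index = ints.index(max_value)
--
--     for i, val in enumerate(ints):
--         if i != max_index and max_value < 2 * val:
--             return -1
--     return max_index
-- ===== SOURCE B (Python) =====
-- def twice_largest_index(ints):
--     if not ints:
--         return -1
--     best_v, best_i, runner = ints[0], 0, None
--     i = 1
--     for v in ints[1:]:
--         if best_v < v:
--             runner = best_v if runner is None else max(runner, best_v)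
--             best_v, best_i = v, i
--         else:
--             runner = v if runner is None else max(runner, v)
--         i += 1
--     if runner is not None and best_v < 2 * runner:
--         return -1
--     return best_i
-- ===== Notes on version B (the rewrite author's own statement) =====
-- stated objective: alternative
-- what changed: B makes a single pass maintaining the running maximum, its first index and a runner-up maximum of all other elements, then decides with one comparison (max < 2*runner-up), instead of A's two library scans (max, index) followed by a third loop comparing every other element against the threshold.
import Mathlib
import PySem

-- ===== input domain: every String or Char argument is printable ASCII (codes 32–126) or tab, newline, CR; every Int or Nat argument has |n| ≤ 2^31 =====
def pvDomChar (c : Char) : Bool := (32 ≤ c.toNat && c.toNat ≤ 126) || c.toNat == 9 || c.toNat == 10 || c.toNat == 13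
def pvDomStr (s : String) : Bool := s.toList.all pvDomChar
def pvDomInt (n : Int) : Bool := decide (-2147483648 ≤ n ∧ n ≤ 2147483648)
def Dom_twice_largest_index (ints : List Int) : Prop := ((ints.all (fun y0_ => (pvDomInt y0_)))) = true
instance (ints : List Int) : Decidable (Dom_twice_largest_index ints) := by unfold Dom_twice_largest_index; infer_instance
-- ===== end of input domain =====

-- B replaces A's three scans (max, index, threshold loop) by a single pass that also
-- maintains a runner-up maximum, deciding with one final comparison (objective: alternative).

-- ===== PORT A =====
-- the 'for i, val in enumerate(ints): if i != max_index and max_value < 2*val: return -1' loop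
def loopA_twice (m mi : Int) : List (Int × Int) → Int
  | [] => mi
  | (i, v) :: rest => if i ≠ mi ∧ m < 2 * v then -1 else loopA_twice m mi rest

def twice_largest_index (ints : List Int) : Int :=
  match ints with
  | [] => -1
  | x :: xs =>
    let m := (PySem.List.max? (x :: xs) (fun y => y)).getD 0      -- max(ints); nonempty so never the default
    let mi : Int := ((PySem.List.index? (x :: xs) m).getD 0 : Nat)  -- ints.index(max_value); always found
    loopA_twice m mi (PySem.List.enumerate (x :: xs) 0)

-- ===== PORT B =====
-- single pass over ints[1:]: best value / its first index / runner-up maximum (None = no other element yet)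
def loopB_twice : List Int → Int → Int → Int → Option Int → Int × Int × Option Int
  | [], _, bv, bi, r => (bv, bi, r)
  | v :: rest, i, bv, bi, r =>
    if bv < v then
      loopB_twice rest (i + 1) v i (some (match r with | none => bv | some rv => max rv bv))
    else
      loopB_twice rest (i + 1) bv bi (some (match r with | none => v | some rv => max rv v))

def twice_largest_index_alt (ints : List Int) : Int :=
  match ints with
  | [] => -1
  | x :: xs =>
    match loopB_twice xs 1 x 0 none with
    | (bv, bi, r) =>
      match r with
      | none => bi
      | some rv => if bv < 2 * rv then -1 else bi

-- ===== PRECONDITION & SPEC =====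
def Spec_twice_largest_index (ints : List Int) (out : Int) : Prop := out = twice_largest_index_alt ints
instance (ints : List Int) (out : Int) : Decidable (Spec_twice_largest_index ints out) := by unfold Spec_twice_largest_index; infer_instance

-- ===== CLAIM (what is proved, stated in full; the proofs are below) =====
def Claim_equal_twice_largest_index : Prop := ∀ (ints : List Int), Dom_twice_largest_index ints → Spec_twice_largest_index ints (twice_largest_index ints)

-- ===== LEMMAS AND PROOFS =====

-- option-valued max and list max (proof-side spec helpers)
def oMaxTL : Option Int → Option Int → Option Int
  | none, b => b
  | some a, none => some a
  | some a, some b => some (max a b)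

def lmaxTL : List Int → Option Int
  | [] => none
  | x :: xs => some (xs.foldl max x)

-- spec of the final best index of loopB
def specITL (xs : List Int) (i bv bi : Int) : Int :=
  if ∀ v ∈ xs, v ≤ bv then bi
  else i + ((PySem.List.index? xs (xs.foldl max bv)).getD 0 : Nat)

theorem oMaxTL_none_right (a : Option Int) : oMaxTL a none = a := by
  cases a <;> rfl

theorem oMaxTL_assoc (a b c : Option Int) : oMaxTL (oMaxTL a b) c = oMaxTL a (oMaxTL b c) := by
  cases a <;> cases b <;> cases c <;> simp [oMaxTL, max_assoc]

theorem oMaxTL_comm (a b : Option Int) : oMaxTL a b = oMaxTL b a := by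
  cases a <;> cases b <;> simp [oMaxTL, max_comm]

theorem foldl_max_max (l : List Int) : ∀ a b : Int, l.foldl max (max a b) = max a (l.foldl max b) := by
  induction l with
  | nil => intro a b; rfl
  | cons z zs ih =>
    intro a b
    simp only [List.foldl_cons]
    rw [max_assoc, ih]

theorem lmaxTL_cons (x : Int) (l : List Int) : lmaxTL (x :: l) = oMaxTL (some x) (lmaxTL l) := by
  cases l with
  | nil => rfl
  | cons y ys =>
    simp only [lmaxTL, oMaxTL, List.foldl_cons]
    rw [foldl_max_max]

theorem oMaxTL_some_match (r : Option Int) (v : Int) :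
    (some (match r with | none => v | some rv => max rv v) : Option Int) = oMaxTL r (some v) := by
  cases r <;> rfl

theorem lmaxTL_swap (a b : Int) (l : List Int) : lmaxTL (a :: b :: l) = lmaxTL (b :: a :: l) := by
  rw [lmaxTL_cons, lmaxTL_cons, lmaxTL_cons, lmaxTL_cons, ← oMaxTL_assoc, ← oMaxTL_assoc,
    oMaxTL_comm (some a) (some b)]

theorem foldl_max_eq_self (xs : List Int) (a : Int) (h : ∀ v ∈ xs, v ≤ a) : xs.foldl max a = a := by
  induction xs generalizing a with
  | nil => rfl
  | cons y ys ih =>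
    simp only [List.foldl_cons]
    rw [max_eq_left (h y (by simp))]
    exact ih a fun v hv => h v (by simp [hv])

-- step lemmas for the three components of the loop state
theorem specITL_step_pos (v : Int) (rest : List Int) (i bv bi : Int) (hlt : bv < v) :
    specITL (v :: rest) i bv bi = specITL rest (i + 1) v i := by
  have hnot : ¬ ∀ w ∈ v :: rest, w ≤ bv := by
    intro h; exact absurd (h v (by simp)) (not_le.mpr hlt)
  have hfold : List.foldl max bv (v :: rest) = List.foldl max v rest := by
    simp [max_eq_right hlt.le]
  simp only [specITL]
  rw [if_neg hnot, hfold]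
  rcases PySem.List.le_foldl_max rest v with ⟨hv_le, hall⟩
  by_cases hrest : ∀ w ∈ rest, w ≤ v
  · rw [if_pos hrest, foldl_max_eq_self rest v hrest, PySem.List.index?_cons_self]
    simp
  · have hvM : v ≠ List.foldl max v rest := by
      push Not at hrest
      rcases hrest with ⟨w, hw, hwv⟩
      exact fun h => absurd (hall w hw) (by rw [← h]; exact not_le.mpr hwv)
    have hMmem : List.foldl max v rest ∈ rest := by
      rcases PySem.List.foldl_max_mem rest v with h | h
      · exact absurd h.symm hvM
      · exact h
    rw [if_neg hrest, PySem.List.index?_cons_of_ne _ hvM]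
    rcases Option.isSome_iff_exists.mp
      ((PySem.List.index?_isSome_iff rest (List.foldl max v rest)).mpr hMmem) with ⟨j, hj⟩
    rw [hj]
    simp only [Option.map_some, Option.getD_some]
    push_cast
    ring

theorem specITL_step_neg (v : Int) (rest : List Int) (i bv bi : Int) (hle : v ≤ bv) :
    specITL (v :: rest) i bv bi = specITL rest (i + 1) bv bi := by
  have hfold : List.foldl max bv (v :: rest) = List.foldl max bv rest := by
    simp [max_eq_left hle]
  simp only [specITL]
  rw [hfold]
  rcases PySem.List.le_foldl_max rest bv with ⟨hbv_le, hall⟩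
  by_cases hrest : ∀ w ∈ rest, w ≤ bv
  · have h2 : ∀ w ∈ v :: rest, w ≤ bv := by
      intro w hw; rcases List.mem_cons.mp hw with h | h
      · exact h ▸ hle
      · exact hrest w h
    rw [if_pos hrest, if_pos h2]
  · have h2 : ¬ ∀ w ∈ v :: rest, w ≤ bv := by
      intro h; exact hrest fun w hw => h w (by simp [hw])
    have hbvM : bv < List.foldl max bv rest := by
      push Not at hrest
      rcases hrest with ⟨w, hw, hwbv⟩
      exact lt_of_lt_of_le hwbv (hall w hw)
    have hvM : v ≠ List.foldl max bv rest := ne_of_lt (lt_of_le_of_lt hle hbvM)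
    have hMmem : List.foldl max bv rest ∈ rest := by
      rcases PySem.List.foldl_max_mem rest bv with h | h
      · exact absurd h (ne_of_gt hbvM)
      · exact h
    rw [if_neg hrest, if_neg h2, PySem.List.index?_cons_of_ne _ hvM]
    rcases Option.isSome_iff_exists.mp
      ((PySem.List.index?_isSome_iff rest (List.foldl max bv rest)).mpr hMmem) with ⟨j, hj⟩
    rw [hj]
    simp only [Option.map_some, Option.getD_some]
    push_cast
    ring

theorem runner_step_pos (v : Int) (rest : List Int) (r : Option Int) (hlt : bv < v) :
    oMaxTL r (lmaxTL ((bv :: v :: rest).erase (List.foldl max bv (v :: rest))))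
      = oMaxTL (oMaxTL r (some bv)) (lmaxTL ((v :: rest).erase (List.foldl max v rest))) := by
  have hfold : List.foldl max bv (v :: rest) = List.foldl max v rest := by
    simp [max_eq_right hlt.le]
  have hbv_ne : bv ≠ List.foldl max v rest :=
    ne_of_lt (lt_of_lt_of_le hlt (PySem.List.le_foldl_max rest v).1)
  have herase : (bv :: v :: rest).erase (List.foldl max v rest)
      = bv :: ((v :: rest).erase (List.foldl max v rest)) :=
    List.erase_cons_tail (by simpa using hbv_ne)
  rw [hfold, herase, lmaxTL_cons, ← oMaxTL_assoc]

theorem runner_step_neg (v : Int) (rest : List Int) (r : Option Int) (hle : v ≤ bv) :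
    oMaxTL r (lmaxTL ((bv :: v :: rest).erase (List.foldl max bv (v :: rest))))
      = oMaxTL (oMaxTL r (some v)) (lmaxTL ((bv :: rest).erase (List.foldl max bv rest))) := by
  have hfold : List.foldl max bv (v :: rest) = List.foldl max bv rest := by
    simp [max_eq_left hle]
  rw [hfold]
  rcases PySem.List.le_foldl_max rest bv with ⟨hbv_le, hall⟩
  by_cases hbvM : bv = List.foldl max bv rest
  · -- the head bv is (a copy of) the max; erase removes it on both sides
    have h1 : (bv :: v :: rest).erase (List.foldl max bv rest) = v :: rest := by
      rw [← hbvM]; exact List.erase_cons_head ..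
    have h2 : (bv :: rest).erase (List.foldl max bv rest) = rest := by
      rw [← hbvM]; exact List.erase_cons_head ..
    rw [h1, h2, lmaxTL_cons, ← oMaxTL_assoc]
  · -- the max sits in rest; the two erased lists differ by a bv/v swap
    have hbvM' : bv < List.foldl max bv rest := lt_of_le_of_ne hbv_le hbvM
    have hvM : v ≠ List.foldl max bv rest := ne_of_lt (lt_of_le_of_lt hle hbvM')
    have h1 : (bv :: v :: rest).erase (List.foldl max bv rest)
        = bv :: v :: rest.erase (List.foldl max bv rest) := by
      rw [List.erase_cons_tail (by simpa using hbvM),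
        List.erase_cons_tail (by simpa using hvM)]
    have h2 : (bv :: rest).erase (List.foldl max bv rest)
        = bv :: rest.erase (List.foldl max bv rest) :=
      List.erase_cons_tail (by simpa using hbvM)
    rw [h1, h2, lmaxTL_swap, lmaxTL_cons, lmaxTL_cons, ← oMaxTL_assoc, ← oMaxTL_assoc,
      oMaxTL_comm r (some v)]

-- the single-pass loop computes: the running max, its first index, and the max of everything else
theorem loopB_inv (xs : List Int) : ∀ (i bv bi : Int) (r : Option Int),
    loopB_twice xs i bv bi r =
      (xs.foldl max bv, specITL xs i bv bi,
        oMaxTL r (lmaxTL ((bv :: xs).erase (xs.foldl max bv)))) := by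
  induction xs with
  | nil =>
    intro i bv bi r
    simp [loopB_twice, specITL, lmaxTL, List.erase_cons_head, oMaxTL_none_right]
  | cons v rest ih =>
    intro i bv bi r
    by_cases hlt : bv < v
    · have estep : loopB_twice (v :: rest) i bv bi r
          = loopB_twice rest (i + 1) v i (some (match r with | none => bv | some rv => max rv bv)) := by
        simp [loopB_twice, hlt]
      have hfold : List.foldl max bv (v :: rest) = List.foldl max v rest := by
        simp [max_eq_right hlt.le]
      rw [estep, ih, oMaxTL_some_match]
      refine Prod.ext hfold.symm (Prod.ext ?_ ?_) <;> simp only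
      · exact (specITL_step_pos v rest i bv bi hlt).symm
      · exact (runner_step_pos v rest r hlt).symm
    · push Not at hlt
      have estep : loopB_twice (v :: rest) i bv bi r
          = loopB_twice rest (i + 1) bv bi (some (match r with | none => v | some rv => max rv v)) := by
        simp [loopB_twice, not_lt.mpr hlt]
      have hfold : List.foldl max bv (v :: rest) = List.foldl max bv rest := by
        simp [max_eq_left hlt]
      rw [estep, ih, oMaxTL_some_match]
      refine Prod.ext hfold.symm (Prod.ext ?_ ?_) <;> simp only
      · exact (specITL_step_neg v rest i bv bi hlt).symm
      · exact (runner_step_neg v rest r hlt).symm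

theorem loopA_eq (m mi : Int) (l : List (Int × Int)) :
    loopA_twice m mi l = if l.any (fun p => decide (p.1 ≠ mi ∧ m < 2 * p.2)) then -1 else mi := by
  induction l with
  | nil => simp [loopA_twice]
  | cons p rest ih =>
    rcases p with ⟨i, v⟩
    by_cases h : i ≠ mi ∧ m < 2 * v
    · simp [loopA_twice, h]
    · simp only [loopA_twice, if_neg h, ih, List.any_cons, decide_eq_false h, Bool.false_or]

theorem lmaxTL_eq_none_iff (l : List Int) : lmaxTL l = none ↔ l = [] := by
  cases l <;> simp [lmaxTL]

theorem lmaxTL_spec (l : List Int) (rv : Int) (h : lmaxTL l = some rv) :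
    rv ∈ l ∧ ∀ y ∈ l, y ≤ rv := by
  cases l with
  | nil => simp [lmaxTL] at h
  | cons y ys =>
    simp only [lmaxTL, Option.some.injEq] at h
    subst h
    rcases PySem.List.le_foldl_max ys y with ⟨h1, h2⟩
    refine ⟨?_, ?_⟩
    · rcases PySem.List.foldl_max_mem ys y with h | h
      · rw [h]; simp
      · simp [h]
    · intro z hz
      rcases List.mem_cons.mp hz with h | h
      · exact h ▸ h1
      · exact h2 z h

theorem specI_top (x : Int) (xs : List Int) :
    specITL xs 1 x 0
      = (((PySem.List.index? (x :: xs) (List.foldl max x xs)).getD 0 : Nat) : Int) := by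
  simp only [specITL]
  by_cases h : ∀ v ∈ xs, v ≤ x
  · rw [if_pos h, foldl_max_eq_self xs x h, PySem.List.index?_cons_self]
    simp
  · rcases PySem.List.le_foldl_max xs x with ⟨hx_le, hall⟩
    have hx : x ≠ List.foldl max x xs := by
      push Not at h
      rcases h with ⟨w, hw, hwx⟩
      exact fun he => absurd (hall w hw) (by rw [← he]; exact not_le.mpr hwx)
    have hmem : List.foldl max x xs ∈ xs := by
      rcases PySem.List.foldl_max_mem xs x with hh | hh
      · exact absurd hh.symm hx
      · exact hh
    rw [if_neg h, PySem.List.index?_cons_of_ne _ hx]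
    rcases Option.isSome_iff_exists.mp
      ((PySem.List.index?_isSome_iff xs (List.foldl max x xs)).mpr hmem) with ⟨j, hj⟩
    rw [hj]
    simp only [Option.map_some, Option.getD_some]
    push_cast
    ring

-- ===== VERDICT (by name: the statement is the Claim_ definition above) =====
theorem twice_largest_index_spec : Claim_equal_twice_largest_index := by
  intro ints _hdom
  unfold Spec_twice_largest_index
  cases ints with
  | nil => rfl
  | cons x xs =>
    have hmax : (PySem.List.max? (x :: xs) (fun y => y)) = some (List.foldl max x xs) :=
      PySem.List.max?_id_cons x xs
    have hMmem : List.foldl max x xs ∈ x :: xs := by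
      rcases PySem.List.foldl_max_mem xs x with h | h
      · rw [h]; simp
      · simp [h]
    obtain ⟨mi0, hmi⟩ := Option.isSome_iff_exists.mp
      ((PySem.List.index?_isSome_iff (x :: xs) (List.foldl max x xs)).mpr hMmem)
    obtain ⟨pre, suf, hdecomp, hlen, hnotin⟩ :=
      (PySem.List.index?_eq_some_iff (x :: xs) (List.foldl max x xs) mi0).mp hmi
    -- A reduces to a guarded scan over enumerate
    have hA : twice_largest_index (x :: xs)
        = if ((PySem.List.enumerate (x :: xs) 0).any
            (fun p => decide (p.1 ≠ (mi0 : Int) ∧ List.foldl max x xs < 2 * p.2))) then -1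
          else (mi0 : Int) := by
      simp only [twice_largest_index, hmax, Option.getD_some, hmi, loopA_eq]
    -- B reduces to one comparison against the runner-up maximum
    have hB : twice_largest_index_alt (x :: xs)
        = (match lmaxTL ((x :: xs).erase (List.foldl max x xs)) with
           | none => specITL xs 1 x 0
           | some rv => if List.foldl max x xs < 2 * rv then -1 else specITL xs 1 x 0) := by
      simp only [twice_largest_index_alt, loopB_inv, oMaxTL]
    have herase : (x :: xs).erase (List.foldl max x xs) = pre ++ suf := by
      rw [hdecomp, List.erase_append_right _ hnotin, List.erase_cons_head]
    have hI : specITL xs 1 x 0 = (mi0 : Int) := by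
      rw [specI_top, hmi]
      simp
    -- the scan condition says: some element other than the first max is > half the max
    have hcond : ((PySem.List.enumerate (x :: xs) 0).any
          (fun p => decide (p.1 ≠ (mi0 : Int) ∧ List.foldl max x xs < 2 * p.2))) = true
        ↔ ∃ v ∈ pre ++ suf, List.foldl max x xs < 2 * v := by
      rw [hdecomp, PySem.List.enumerate_append, List.any_append,
        PySem.List.enumerate_cons, List.any_cons]
      have hmid : decide ((0 + (pre.length : Int) ≠ (mi0 : Int))
          ∧ List.foldl max x xs < 2 * List.foldl max x xs) = false := by
        rw [decide_eq_false_iff_not]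
        rintro ⟨hne, -⟩
        exact hne (by rw [hlen]; ring)
      rw [hmid, Bool.false_or]
      have h1 : ((PySem.List.enumerate pre 0).any
            (fun p => decide (p.1 ≠ (mi0 : Int) ∧ List.foldl max x xs < 2 * p.2))) = true
          ↔ ∃ v ∈ pre, List.foldl max x xs < 2 * v := by
        rw [List.any_eq_true]
        constructor
        · rintro ⟨p, hp, hf⟩
          rw [decide_eq_true_eq] at hf
          rcases (PySem.List.mem_enumerate_iff pre 0 p).mp hp with ⟨k, hk, rfl⟩
          exact ⟨pre[k], by simp, hf.2⟩
        · rintro ⟨v, hv, hlt⟩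
          rcases List.mem_iff_getElem.mp hv with ⟨k, hk, rfl⟩
          refine ⟨(0 + (k : Int), pre[k]),
            (PySem.List.mem_enumerate_iff pre 0 _).mpr ⟨k, hk, rfl⟩, ?_⟩
          rw [decide_eq_true_eq]
          have hkmi : k < mi0 := hlen ▸ hk
          exact ⟨by omega, hlt⟩
      have h2 : ((PySem.List.enumerate suf (0 + (pre.length : Int) + 1)).any
            (fun p => decide (p.1 ≠ (mi0 : Int) ∧ List.foldl max x xs < 2 * p.2))) = true
          ↔ ∃ v ∈ suf, List.foldl max x xs < 2 * v := by
        rw [List.any_eq_true]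
        constructor
        · rintro ⟨p, hp, hf⟩
          rw [decide_eq_true_eq] at hf
          rcases (PySem.List.mem_enumerate_iff suf _ p).mp hp with ⟨k, hk, rfl⟩
          exact ⟨suf[k], by simp, hf.2⟩
        · rintro ⟨v, hv, hlt⟩
          rcases List.mem_iff_getElem.mp hv with ⟨k, hk, rfl⟩
          refine ⟨(0 + (pre.length : Int) + 1 + (k : Int), suf[k]),
            (PySem.List.mem_enumerate_iff suf _ _).mpr ⟨k, hk, rfl⟩, ?_⟩
          rw [decide_eq_true_eq]
          refine ⟨?_, hlt⟩
          have : pre.length = mi0 := hlen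
          omega
      rw [Bool.or_eq_true, h1, h2]
      constructor
      · rintro (⟨v, hv, hlt⟩ | ⟨v, hv, hlt⟩)
        · exact ⟨v, List.mem_append_left _ hv, hlt⟩
        · exact ⟨v, List.mem_append_right _ hv, hlt⟩
      · rintro ⟨v, hv, hlt⟩
        rcases List.mem_append.mp hv with h | h
        · exact Or.inl ⟨v, h, hlt⟩
        · exact Or.inr ⟨v, h, hlt⟩
    rw [hA, hB, herase]
    by_cases hC : ∃ v ∈ pre ++ suf, List.foldl max x xs < 2 * v
    · rw [if_pos (hcond.mpr hC)]
      rcases hC with ⟨v, hv, hlt⟩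
      cases hl : lmaxTL (pre ++ suf) with
      | none => exact absurd ((lmaxTL_eq_none_iff _).mp hl ▸ hv) (List.not_mem_nil)
      | some rv =>
        rcases lmaxTL_spec _ _ hl with ⟨-, hub⟩
        have h2rv : List.foldl max x xs < 2 * rv := lt_of_lt_of_le hlt (by
          have := hub v hv
          omega)
        show (-1 : Int) = if List.foldl max x xs < 2 * rv then -1 else specITL xs 1 x 0
        rw [if_pos h2rv]
    · rw [if_neg (fun h => hC (hcond.mp h))]
      cases hl : lmaxTL (pre ++ suf) with
      | none => exact hI.symm
      | some rv =>
        rcases lmaxTL_spec _ _ hl with ⟨hrv_mem, -⟩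
        have hnlt : ¬ List.foldl max x xs < 2 * rv := fun hlt => hC ⟨rv, hrv_mem, hlt⟩
        show ((mi0 : Int)) = if List.foldl max x xs < 2 * rv then -1 else specITL xs 1 x 0
        rw [if_neg hnlt]
        exact hI.symm
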